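-- pv_equiv track=rewrite | github.com/mariellewalet/MarkUp | conversion.py | count_hashtag
-- ===== SOURCE A (Python) =====
-- def count_hashtag(string):
--     count = 0
--     for char in string:
--         if char == '#':
--             count+=1
--         elif count>6:
--             return 0
--         else:
--             return count
-- ===== SOURCE B (Python) =====
-- def count_hashtag(string):
--     stripped = string.lstrip('#')
--     count = len(string) - len(stripped)
--     return 0 if count > 6 else count
-- ===== Notes on version B (the rewrite author's own statement) =====
-- stated objective: simpler
-- what changed: Replaces A's explicit early-exiting character loop with a closed form: leading-hash count via lstrip('#') length difference plus one final branch.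
-- outside the precondition, e.g. on count_hashtag('###'): A returns None, B returns 3; on count_hashtag('#'): A returns None, B returns 1; on count_hashtag(''): A returns None, B returns 0
import Mathlib
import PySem

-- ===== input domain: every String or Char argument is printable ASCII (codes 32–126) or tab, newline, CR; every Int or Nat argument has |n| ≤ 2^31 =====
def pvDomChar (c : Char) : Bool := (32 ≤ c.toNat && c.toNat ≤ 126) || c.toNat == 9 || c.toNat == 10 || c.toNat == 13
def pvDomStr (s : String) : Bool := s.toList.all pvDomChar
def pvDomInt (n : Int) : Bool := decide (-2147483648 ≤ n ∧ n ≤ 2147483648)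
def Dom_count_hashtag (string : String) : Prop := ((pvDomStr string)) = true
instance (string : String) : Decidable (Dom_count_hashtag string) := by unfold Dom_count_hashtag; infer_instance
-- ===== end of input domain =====

-- B replaces A's explicit early-exiting character loop by a closed form
-- (leading-hash count = length difference after lstrip('#')) plus one branch: simpler.


-- ===== PORT A =====
-- A's for-loop with early returns; `none` = Python falling off the loop (returns None, not an int).
def count_hashtag_loop : List Char → Int → Option Int
  | [], _ => none
  | c :: cs, count =>
    if c = '#' then count_hashtag_loop cs (count + 1)
    else if count > 6 then some 0
    else some count

-- the `.getD 0` only covers the None case, which Pre_count_hashtag excludes.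
def count_hashtag (string : String) : Int :=
  (count_hashtag_loop string.toList 0).getD 0

-- ===== PORT B =====
def count_hashtag_alt (string : String) : Int :=
  let stripped := string.toList.dropWhile (fun c => c == '#')
  let count : Int := string.toList.length - stripped.length
  if count > 6 then 0 else count

-- ===== PRECONDITION & SPEC =====
-- Pre_ excludes strings whose characters are all '#' (including the empty string):
-- there A falls off its loop and returns None, which is not an int.
def Pre_count_hashtag (string : String) : Prop :=
  (string.toList.any (fun c => c != '#')) = true
instance (string : String) : Decidable (Pre_count_hashtag string) := by
  unfold Pre_count_hashtag; infer_instance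

def pvWitness_count_hashtag : String := "##abc"

def Spec_count_hashtag (string : String) (out : Int) : Prop := out = count_hashtag_alt string
instance (string : String) (out : Int) : Decidable (Spec_count_hashtag string out) := by unfold Spec_count_hashtag; infer_instance

-- ===== CLAIM (what is proved, stated in full; the proofs are below) =====
def Claim_equal_count_hashtag : Prop := ∀ (string : String), Dom_count_hashtag string → Pre_count_hashtag string → Spec_count_hashtag string (count_hashtag string)

-- ===== LEMMAS AND PROOFS =====

-- A's loop, on a list containing a non-'#' char, returns the branch of
-- (accumulator + number of leading hashes).
theorem count_hashtag_loop_eq (l : List Char) :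
    ∀ k : Int, (l.any (fun c => c != '#')) = true →
    count_hashtag_loop l k =
      some (if k + (l.takeWhile (fun c => c == '#')).length > 6 then 0
            else k + (l.takeWhile (fun c => c == '#')).length) := by
  induction l with
  | nil => intro k h; simp at h
  | cons c cs ih =>
    intro k h
    by_cases hc : c = '#'
    · subst hc
      simp only [List.any_cons] at h
      simp only [count_hashtag_loop, List.takeWhile_cons]
      simp only [beq_self_eq_true, if_pos]
      have h' : (cs.any (fun c => c != '#')) = true := by simpa using h
      rw [ih (k + 1) h']
      simp only [List.length_cons]
      congr 1
      push_cast
      split_ifs <;> omega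
    · have hcb : (c == '#') = false := by simpa using hc
      simp only [count_hashtag_loop, if_neg hc, List.takeWhile_cons, hcb]
      simp only [Bool.false_eq_true, if_false, List.length_nil, Nat.cast_zero, add_zero]
      split_ifs <;> rfl

theorem takeWhile_length_eq (l : List Char) :
    (l.length : Int) - (l.dropWhile (fun c => c == '#')).length
      = (l.takeWhile (fun c => c == '#')).length := by
  have := List.takeWhile_append_dropWhile (p := fun c => c == '#') (l := l)
  have hlen : (l.takeWhile (fun c => c == '#')).length
      + (l.dropWhile (fun c => c == '#')).length = l.length := by
    conv_rhs => rw [← this]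
    exact (List.length_append).symm
  omega

-- ===== VERDICT (by name: the statement is the Claim_ definition above) =====
theorem count_hashtag_spec : Claim_equal_count_hashtag := by
  intro s _ hpre
  unfold Spec_count_hashtag count_hashtag count_hashtag_alt
  rw [count_hashtag_loop_eq s.toList 0 hpre]
  rw [← takeWhile_length_eq]
  simp
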